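-- pv_equiv track=rewrite | github.com/2018hsridhar/Leetcode_Solutions | leetcode_524.py | findLongestWord
-- ===== SOURCE A (Python) =====
-- from typing import List
--
-- def stringHasWordAsSubsequence(s:str, word:str) -> bool:
--     wordIsASubsequence = True
--     wordPtr = 0
--     sPtr = 0
--     while(sPtr < len(s) and wordPtr < len(word)):
--         if(word[wordPtr] == s[sPtr]):
--             sPtr += 1
--             wordPtr += 1
--         else:
--             sPtr += 1
--     wordIsASubsequence = False if (wordPtr < len(word)) else True # Ternary
--     return wordIsASubsequence
--
-- def findLongestWord(s: str, dictionary: List[str]) -> str: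
--     myLongestWord = ""
--     myLongestWordLen = 0
--     for word in dictionary:
--         if(stringHasWordAsSubsequence(s,word)):
--             if(len(word) > myLongestWordLen):
--                 myLongestWordLen = len(word) # len for iterable type
--                 myLongestWord = word
--             elif(len(word) == myLongestWordLen):
--                 # Use ASCII/Unicode ordering.
--                 if(myLongestWord > word): # is this string comparison in PY?
--                     myLongestWord = word
--     return myLongestWord
-- ===== SOURCE B (Python) =====
-- from typing import List
--
-- def findLongestWord(s: str, dictionary: List[str]) -> str:
--     def matches(word: str) -> bool:
--         it = iter(s)
--         return all(c in it for c in word)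
--     for word in sorted(dictionary, key=lambda w: (-len(w), w)):
--         if matches(word):
--             return word
--     return ""
-- ===== Notes on version B (the rewrite author's own statement) =====
-- stated objective: alternative
-- what changed: A keeps a running best with explicit length/lexicographic tie comparisons in one scan; B sorts a copy of the dictionary by (-len(word), word) and returns the first word that is a subsequence of s (iterator-based test), defaulting to ''.
import Mathlib
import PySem

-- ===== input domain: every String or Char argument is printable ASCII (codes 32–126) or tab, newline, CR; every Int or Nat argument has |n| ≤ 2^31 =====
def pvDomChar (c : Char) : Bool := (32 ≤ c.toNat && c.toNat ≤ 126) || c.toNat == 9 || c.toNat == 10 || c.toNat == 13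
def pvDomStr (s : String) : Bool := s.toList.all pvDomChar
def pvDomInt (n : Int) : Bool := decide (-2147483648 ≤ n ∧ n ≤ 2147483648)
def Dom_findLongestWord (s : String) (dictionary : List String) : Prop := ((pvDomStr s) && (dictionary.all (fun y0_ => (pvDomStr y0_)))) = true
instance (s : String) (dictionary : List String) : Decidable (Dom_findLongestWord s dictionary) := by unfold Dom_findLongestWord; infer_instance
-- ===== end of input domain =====

-- B sorts a copy of the dictionary by (-len, word) and returns the first word that is a
-- subsequence of s, instead of A's single running-best scan; alternative algorithm, same result.


-- ===== PORT A =====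
-- two-pointer while loop of stringHasWordAsSubsequence: sPtr/wordPtr advance = recursion on the char lists
def hasSubLoop : List Char → List Char → Bool
  | _, [] => true
  | [], _ :: _ => false
  | c :: sr, w :: wr => if w == c then hasSubLoop sr wr else hasSubLoop sr (w :: wr)

def stringHasWordAsSubsequence (s word : String) : Bool :=
  hasSubLoop s.toList word.toList

-- loop body of A's for loop; state = (myLongestWord, myLongestWordLen); 'myLongestWord > word'
-- is Python code-point string comparison = '<' on the char lists (PySem convention)
def loopA (s : String) (st : String × Int) (word : String) : String × Int :=
  if stringHasWordAsSubsequence s word then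
    if PySem.Str.len word > st.2 then (word, PySem.Str.len word)
    else if PySem.Str.len word = st.2 then
      if word.toList < st.1.toList then (word, st.2) else st
    else st
  else st

def findLongestWord (s : String) (dictionary : List String) : String :=
  (dictionary.foldl (loopA s) (("" : String), (0 : Int))).1

-- ===== PORT B =====
-- 'c in it': consume the iterator of s up to (and including) the first occurrence of c
def dropUntil (c : Char) : List Char → Option (List Char)
  | [] => none
  | d :: sr => if c == d then some sr else dropUntil c sr

-- all(c in it for c in word)
def isSubseq : List Char → List Char → Bool
  | [], _ => true
  | c :: wr, sL =>
    match dropUntil c sL with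
    | none => false
    | some rest => isSubseq wr rest

def findLongestWord_alt (s : String) (dictionary : List String) : String :=
  ((PySem.List.sorted2 dictionary (fun w => -(PySem.Str.len w)) (fun w => w.toList)).find?
      (fun w => isSubseq w.toList s.toList)).getD ""

-- ===== PRECONDITION & SPEC =====
def Spec_findLongestWord (s : String) (dictionary : List String) (out : String) : Prop := out = findLongestWord_alt s dictionary
instance (s : String) (dictionary : List String) (out : String) : Decidable (Spec_findLongestWord s dictionary out) := by unfold Spec_findLongestWord; infer_instance

-- ===== CLAIM (what is proved, stated in full; the proofs are below) =====
def Claim_equal_findLongestWord : Prop := ∀ (s : String) (dictionary : List String), Dom_findLongestWord s dictionary → Spec_findLongestWord s dictionary (findLongestWord s dictionary)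

-- ===== LEMMAS AND PROOFS =====

-- the priority key: smaller = longer word, ties by lexicographically smaller word
def kf (w : String) : Lex (Int × List Char) := toLex (-(PySem.Str.len w), w.toList)

theorem kf_inj {a b : String} (h : kf a = kf b) : a = b := by
  unfold kf at h
  have h2 := congrArg (fun p : Lex (Int × List Char) => (ofLex p).2) h
  simpa [String.toList_inj] using h2

theorem kf_le_empty (y : String) : kf y ≤ kf "" := by
  rw [kf, kf, Prod.Lex.le_iff]
  rcases Nat.eq_zero_or_pos y.toList.length with h | h
  · right
    refine ⟨by simp [PySem.Str.len_eq, h], ?_⟩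
    simp [List.length_eq_zero_iff.mp h]
  · left
    simp only [ofLex_toLex]
    have : PySem.Str.len "" = 0 := by simp [PySem.Str.len_eq]
    rw [PySem.Str.len_eq, this]
    omega

-- A's subsequence test = B's iterator-based test
theorem hasSub_eq_isSubseq : ∀ (sL wL : List Char), hasSubLoop sL wL = isSubseq wL sL := by
  intro sL
  induction sL with
  | nil => intro wL; cases wL <;> simp [hasSubLoop, isSubseq, dropUntil]
  | cons d sr ih =>
    intro wL
    cases wL with
    | nil => simp [hasSubLoop, isSubseq]
    | cons c wr =>
      by_cases h : c = d
      · simp [hasSubLoop, isSubseq, dropUntil, h, ih wr]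
      · have h' : (c == d) = false := by simp [h]
        simp only [hasSubLoop, isSubseq, dropUntil, h']
        rw [ih (c :: wr)]
        simp [isSubseq]

-- sorted2's comparator is exactly 'strictly smaller kf'
theorem kf_lt_iff (a b : String) :
    kf a < kf b ↔
      (-(PySem.Str.len a) < -(PySem.Str.len b) ∨
        (-(PySem.Str.len a) = -(PySem.Str.len b) ∧ a.toList < b.toList)) := by
  rw [kf, kf, Prod.Lex.lt_iff]
  simp only [ofLex_toLex]

theorem before_eq (a b : String) :
    (decide (-(PySem.Str.len a) < -(PySem.Str.len b)) ||
      (!decide (-(PySem.Str.len b) < -(PySem.Str.len a)) && decide (a.toList < b.toList)))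
    = decide (kf a < kf b) := by
  rw [decide_eq_decide.mpr (kf_lt_iff a b), Bool.decide_or, Bool.decide_and]
  by_cases hP1 : -(PySem.Str.len a) < -(PySem.Str.len b)
  · simp only [hP1, decide_true, Bool.true_or]
  · have hiff : (¬ (-(PySem.Str.len b) < -(PySem.Str.len a))) ↔
        (-(PySem.Str.len a) = -(PySem.Str.len b)) := by omega
    rw [← decide_not, decide_eq_decide.mpr hiff]

theorem foldl_insertBy_pairwise :
    ∀ (xs acc : List String),
      acc.Pairwise (fun a b => kf a ≤ kf b) →
      (xs.foldl (fun acc x => PySem.List.insertBy (fun a b => decide (kf a < kf b)) x acc) acc).Pairwise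
        (fun a b => kf a ≤ kf b) := by
  intro xs
  induction xs with
  | nil => intro acc h; simpa using h
  | cons x rest ih =>
    intro acc h
    simp only [List.foldl_cons]
    exact ih _ (PySem.List.insertBy_pairwise_le kf x acc h)

theorem sorted2_pairwise_kf (xs : List String) :
    (PySem.List.sorted2 xs (fun w => -(PySem.Str.len w)) (fun w => w.toList)).Pairwise
      (fun a b => kf a ≤ kf b) := by
  have hb : (fun a b : String =>
      decide (-(PySem.Str.len a) < -(PySem.Str.len b)) ||
        (!decide (-(PySem.Str.len b) < -(PySem.Str.len a)) && decide (a.toList < b.toList)))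
      = (fun a b : String => decide (kf a < kf b)) := by
    funext a b; exact before_eq a b
  show (PySem.List.sorted2 xs _ _ false).Pairwise _
  rw [PySem.List.sorted2]
  simp only [if_neg (by decide : ¬ (false = true))]
  rw [hb]
  exact foldl_insertBy_pairwise xs [] List.Pairwise.nil

def minstep (b w : String) : String := if kf w < kf b then w else b

theorem foldl_minstep_spec :
    ∀ (F : List String) (a : String),
      F.foldl minstep a ∈ a :: F ∧ ∀ y ∈ a :: F, kf (F.foldl minstep a) ≤ kf y := by
  intro F
  induction F with
  | nil =>
    intro a
    refine ⟨List.mem_cons_self, ?_⟩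
    intro y hy
    rcases List.mem_singleton.mp hy with rfl
    exact le_refl _
  | cons w rest ih =>
    intro a
    simp only [List.foldl_cons]
    obtain ⟨hmem, hmin⟩ := ih (minstep a w)
    have hstep_le_a : kf (minstep a w) ≤ kf a := by
      unfold minstep; split_ifs with h
      · exact le_of_lt h
      · exact le_refl _
    have hstep_le_w : kf (minstep a w) ≤ kf w := by
      unfold minstep; split_ifs with h
      · exact le_refl _
      · exact not_lt.mp h
    have hle := hmin _ List.mem_cons_self
    constructor
    · rcases List.mem_cons.mp hmem with h | h
      · rw [h]
        unfold minstep; split_ifs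
        · exact List.mem_cons_of_mem _ List.mem_cons_self
        · exact List.mem_cons_self
      · exact List.mem_cons_of_mem _ (List.mem_cons_of_mem _ h)
    · intro y hy
      rcases List.mem_cons.mp hy with rfl | hy
      · exact le_trans hle hstep_le_a
      rcases List.mem_cons.mp hy with rfl | hy
      · exact le_trans hle hstep_le_w
      · exact hmin _ (List.mem_cons_of_mem _ hy)

-- A's running-best loop is the kf-minimum fold over the words passing the test
theorem foldA_eq (s : String) :
    ∀ (dict : List String) (b : String),
      (dict.foldl (loopA s) (b, PySem.Str.len b)).1
        = (dict.filter (fun w => stringHasWordAsSubsequence s w)).foldl minstep b := by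
  intro dict
  induction dict with
  | nil => intro b; simp
  | cons w rest ih =>
    intro b
    simp only [List.foldl_cons, List.filter_cons]
    have hlt : (kf w < kf b) ↔
        (PySem.Str.len w > PySem.Str.len b ∨
          (PySem.Str.len w = PySem.Str.len b ∧ w.toList < b.toList)) := by
      rw [kf_lt_iff]
      have e1 : (-(PySem.Str.len w) < -(PySem.Str.len b)) ↔
          PySem.Str.len w > PySem.Str.len b := by omega
      have e2 : (-(PySem.Str.len w) = -(PySem.Str.len b)) ↔
          PySem.Str.len w = PySem.Str.len b := by omega
      rw [e1, e2]
    by_cases hsub : stringHasWordAsSubsequence s w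
    · rw [if_pos hsub, List.foldl_cons]
      rcases lt_trichotomy (PySem.Str.len w) (PySem.Str.len b) with hc | hc | hc
      · have hm : minstep b w = b := by
          unfold minstep; rw [if_neg]; rw [hlt]
          rintro (h | ⟨h1, h2⟩) <;> omega
        have hstep : loopA s (b, PySem.Str.len b) w = (b, PySem.Str.len b) := by
          rw [loopA, if_pos hsub,
              if_neg (by show ¬ PySem.Str.len w > PySem.Str.len b; omega),
              if_neg (by show ¬ PySem.Str.len w = PySem.Str.len b; omega)]
        rw [hstep, hm]
        exact ih b
      · by_cases h3 : w.toList < b.toList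
        · have hm : minstep b w = w := by
            unfold minstep; rw [if_pos]; rw [hlt]; right; exact ⟨hc, h3⟩
          have hstep : loopA s (b, PySem.Str.len b) w = (w, PySem.Str.len w) := by
            rw [loopA, if_pos hsub,
                if_neg (by show ¬ PySem.Str.len w > PySem.Str.len b; omega),
                if_pos (by show PySem.Str.len w = PySem.Str.len b; omega),
                if_pos h3]
            show (w, PySem.Str.len b) = (w, PySem.Str.len w)
            rw [hc]
          rw [hstep, hm]
          exact ih w
        · have hm : minstep b w = b := by
            unfold minstep; rw [if_neg]; rw [hlt]
            rintro (h | ⟨h1, h2⟩)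
            · omega
            · exact h3 h2
          have hstep : loopA s (b, PySem.Str.len b) w = (b, PySem.Str.len b) := by
            rw [loopA, if_pos hsub,
                if_neg (by show ¬ PySem.Str.len w > PySem.Str.len b; omega),
                if_pos (by show PySem.Str.len w = PySem.Str.len b; omega),
                if_neg h3]
          rw [hstep, hm]
          exact ih b
      · have hm : minstep b w = w := by
          unfold minstep; rw [if_pos]; rw [hlt]; left; exact hc
        have hstep : loopA s (b, PySem.Str.len b) w = (w, PySem.Str.len w) := by
          rw [loopA, if_pos hsub,
              if_pos (by show PySem.Str.len w > PySem.Str.len b; omega)]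
        rw [hstep, hm]
        exact ih w
    · rw [if_neg (by simpa using hsub)]
      have hstep : loopA s (b, PySem.Str.len b) w = (b, PySem.Str.len b) := by
        rw [loopA, if_neg (by simpa using hsub)]
      rw [hstep]
      exact ih b

-- ===== VERDICT (by name: the statement is the Claim_ definition above) =====
theorem findLongestWord_spec : Claim_equal_findLongestWord := by
  intro s dictionary _
  unfold Spec_findLongestWord
  -- name the pieces
  set P : String → Bool := fun w => stringHasWordAsSubsequence s w with hP
  have hPQ : P = fun w => isSubseq w.toList s.toList := by
    funext w
    simp [hP, stringHasWordAsSubsequence, hasSub_eq_isSubseq]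
  set L := PySem.List.sorted2 dictionary (fun w => -(PySem.Str.len w)) (fun w => w.toList) with hL
  -- A's side: minimum fold over the filtered dictionary
  have hA : findLongestWord s dictionary = (dictionary.filter P).foldl minstep "" := by
    have h0 : (0 : Int) = PySem.Str.len "" := by simp [PySem.Str.len_eq]
    rw [findLongestWord, h0, foldA_eq]
  -- B's side: head of the filtered sorted list
  have hB : findLongestWord_alt s dictionary = ((L.filter P).head?).getD "" := by
    rw [findLongestWord_alt, ← hL, hPQ, List.head?_filter]
  have hperm : (L.filter P).Perm (dictionary.filter P) :=
    List.Perm.filter P (PySem.List.sorted2_perm dictionary _ _ false)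
  rw [hA, hB]
  cases hG : L.filter P with
  | nil =>
    have hF : dictionary.filter P = [] := List.Perm.eq_nil (hG ▸ hperm).symm
    rw [hF]
    simp
  | cons g gs =>
    have hpair : (L.filter P).Pairwise (fun a b => kf a ≤ kf b) :=
      List.Pairwise.filter P (sorted2_pairwise_kf dictionary)
    rw [hG] at hpair hperm
    have hgmin : ∀ y ∈ dictionary.filter P, kf g ≤ kf y := by
      intro y hy
      have : y ∈ g :: gs := hperm.symm.subset hy
      rcases List.mem_cons.mp this with rfl | hy'
      · exact le_refl _
      · exact (List.pairwise_cons.mp hpair).1 y hy'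
    obtain ⟨hmem, hmin⟩ := foldl_minstep_spec (dictionary.filter P) ""
    have hg_in : g ∈ dictionary.filter P := hperm.subset List.mem_cons_self
    have h1 : kf ((dictionary.filter P).foldl minstep "") ≤ kf g :=
      hmin _ (List.mem_cons_of_mem _ hg_in)
    have h2 : kf g ≤ kf ((dictionary.filter P).foldl minstep "") := by
      rcases List.mem_cons.mp hmem with h | h
      · rw [h]; exact kf_le_empty g
      · exact hgmin _ h
    have := kf_inj (le_antisymm h1 h2)
    simp [this]
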